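-- pv_equiv track=rewrite | github.com/miliar/Code_Jam_Webscraper | solutions_python/Problem_210/25.py | parenting_partnering_solve
-- ===== SOURCE A (Python) =====
-- def parenting_partnering_solve(cam_start, cam_end, jam_start, jam_end):
--     cam_time = 720
--     jam_time = 720
--     for i in range(len(cam_start)):
--         cam_time -= (cam_end[i] - cam_start[i])
--     for i in range(len(jam_start)):
--         jam_time -= (jam_end[i] - jam_start[i])
--
--     all_events = []
--     for i in range(len(cam_start)):
--         all_events.append((cam_start[i], cam_end[i], "c"))
--     for i in range(len(jam_start)):
--         all_events.append((jam_start[i], jam_end[i], "j"))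
--     all_events.sort(key=lambda x: x[0])
--
--     cam_bridges = []
--     for i in range(0, len(all_events) - 1):
--         if all_events[i][2] == "c" and all_events[i+1][2] == "c":
--             cam_bridges.append(all_events[i+1][0] - all_events[i][1])
--     if all_events[-1][2] == "c" and all_events[0][2] == "c":
--         cam_bridges.append(all_events[0][0] + 1440 - all_events[-1][1])
--
--     jam_bridges = []
--     for i in range(0, len(all_events) - 1):
--         if all_events[i][2] == "j" and all_events[i+1][2] == "j":
--             jam_bridges.append(all_events[i+1][0] - all_events[i][1])
--     if all_events[-1][2] == "j" and all_events[0][2] == "j":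
--         jam_bridges.append(all_events[0][0] + 1440 - all_events[-1][1])
--
--     min_switches = 0
--     for i in range(0, len(all_events) - 1):
--         if all_events[i][2] != all_events[i+1][2]:
--             min_switches += 1
--     if all_events[-1][2] != all_events[0][2]:
--         min_switches += 1
--     #print cam_bridges, cam_time
--     #print jam_bridges, jam_time
--     cam_bridges.sort()
--     if len(cam_bridges) > 0:
--         while cam_time >= cam_bridges[0]:
--             cam_time -= cam_bridges[0]
--             cam_bridges.remove(min(cam_bridges))
--             cam_bridges.sort()
--             if len(cam_bridges) == 0:
--                 break
--     if len(jam_bridges) > 0: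
--         jam_bridges.sort()
--         while jam_time >= jam_bridges[0]:
--             jam_time -= jam_bridges[0]
--             jam_bridges.remove(min(jam_bridges))
--             jam_bridges.sort()
--             if len(jam_bridges) == 0:
--                 break
--
--     min_switches += 2 * len(cam_bridges)
--     min_switches += 2 * len(jam_bridges)
--     return min_switches
-- ===== SOURCE B (Python) =====
-- def _leftover(bridges, budget):
--     # one pass over the bridges sorted once: merge while the budget allows
--     k = 0
--     for b in sorted(bridges):
--         if budget < b:
--             break
--         budget -= b
--         k += 1
--     return len(bridges) - k
--
--
-- def parenting_partnering_solve(cam_start, cam_end, jam_start, jam_end):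
--     events = sorted([(s, e, 'c') for s, e in zip(cam_start, cam_end)]
--                     + [(s, e, 'j') for s, e in zip(jam_start, jam_end)],
--                     key=lambda t: t[0])
--     first = events[0]
--     cb, jb, switches = [], [], 0
--     # single circular pass: classify every adjacent pair (incl. last->first, shifted by a day)
--     for (s1, e1, w1), (s2, _, w2) in zip(events, events[1:] + [(first[0] + 1440, first[1], first[2])]):
--         if w1 != w2:
--             switches += 1
--         elif w1 == 'c':
--             cb.append(s2 - e1)
--         else:
--             jb.append(s2 - e1)
--     cam_budget = 720 - sum(e - s for s, e, w in events if w == 'c')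
--     jam_budget = 720 - sum(e - s for s, e, w in events if w == 'j')
--     return switches + 2 * _leftover(cb, cam_budget) + 2 * _leftover(jb, jam_budget)
-- ===== Notes on version B (the rewrite author's own statement) =====
-- stated objective: faster
-- what changed: A's four separate scans (two bridge-collecting passes, a switch pass, two index budget loops) become one fused circular pass over adjacent event pairs, and A's merge loop that re-sorts the bridge list and remove(min())s on every iteration becomes a single scan of the bridges sorted once.
import Mathlib
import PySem

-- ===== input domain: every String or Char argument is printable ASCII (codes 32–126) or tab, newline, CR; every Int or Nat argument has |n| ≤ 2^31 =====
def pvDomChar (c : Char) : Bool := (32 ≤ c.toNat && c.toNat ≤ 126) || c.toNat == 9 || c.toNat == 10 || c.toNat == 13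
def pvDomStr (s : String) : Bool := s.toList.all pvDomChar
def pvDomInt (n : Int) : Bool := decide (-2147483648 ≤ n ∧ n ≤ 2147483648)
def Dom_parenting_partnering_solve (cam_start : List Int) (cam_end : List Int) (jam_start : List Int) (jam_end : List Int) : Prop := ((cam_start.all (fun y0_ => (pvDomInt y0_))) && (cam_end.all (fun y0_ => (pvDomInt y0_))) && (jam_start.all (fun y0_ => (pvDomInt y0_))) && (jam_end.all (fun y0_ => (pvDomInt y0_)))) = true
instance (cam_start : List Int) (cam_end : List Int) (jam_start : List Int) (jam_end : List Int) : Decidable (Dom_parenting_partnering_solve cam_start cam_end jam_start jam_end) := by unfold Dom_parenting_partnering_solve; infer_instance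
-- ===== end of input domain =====

-- B replaces A's four separate scans and its re-sort-and-remove(min) merge loop by one fused
-- circular pass over adjacent event pairs plus a single scan of the bridges sorted once (faster).

-- ===== PORT A =====
-- A's while loop: subtract bridges[0], remove min, re-sort, stop when empty or budget < head.
-- fuel = the list length at entry; each iteration removes one element, so it never runs out.
def pvAWhile : Nat → Int → List Int → List Int
  | 0, _, bridges => bridges
  | fuel + 1, time, bridges =>
    match bridges with
    | [] => bridges
    | b0 :: _ =>
      if b0 ≤ time then
        let bridges' := PySem.List.sorted
          ((PySem.List.remove? bridges ((PySem.List.min? bridges (fun x => x)).getD 0)).getD bridges)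
          (fun x => x) false
        if bridges'.length = 0 then bridges'
        else pvAWhile fuel (time - b0) bridges'
      else bridges

def parenting_partnering_solve (cam_start : List Int) (cam_end : List Int) (jam_start : List Int) (jam_end : List Int) : Int :=
  let cam_time : Int := (PySem.List.pyRange 0 (cam_start.length : Int) 1).foldl
    (fun t i => t - (PySem.List.pyGetD cam_end i 0 - PySem.List.pyGetD cam_start i 0)) 720
  let jam_time : Int := (PySem.List.pyRange 0 (jam_start.length : Int) 1).foldl
    (fun t i => t - (PySem.List.pyGetD jam_end i 0 - PySem.List.pyGetD jam_start i 0)) 720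
  let all_events : List (Int × Int × Char) := (PySem.List.pyRange 0 (cam_start.length : Int) 1).foldl
    (fun acc i => acc ++ [(PySem.List.pyGetD cam_start i 0, PySem.List.pyGetD cam_end i 0, 'c')]) []
  let all_events := (PySem.List.pyRange 0 (jam_start.length : Int) 1).foldl
    (fun acc i => acc ++ [(PySem.List.pyGetD jam_start i 0, PySem.List.pyGetD jam_end i 0, 'j')]) all_events
  let all_events := PySem.List.sorted all_events (fun t => t.1) false
  let d : Int × Int × Char := (0, 0, ' ')
  let cam_bridges := (PySem.List.pyRange 0 ((all_events.length : Int) - 1) 1).foldl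
    (fun acc i => if (PySem.List.pyGetD all_events i d).2.2 == 'c' && (PySem.List.pyGetD all_events (i+1) d).2.2 == 'c'
      then acc ++ [(PySem.List.pyGetD all_events (i+1) d).1 - (PySem.List.pyGetD all_events i d).2.1] else acc) []
  let cam_bridges := if (PySem.List.pyGetD all_events (-1) d).2.2 == 'c' && (PySem.List.pyGetD all_events 0 d).2.2 == 'c'
      then cam_bridges ++ [(PySem.List.pyGetD all_events 0 d).1 + 1440 - (PySem.List.pyGetD all_events (-1) d).2.1] else cam_bridges
  let jam_bridges := (PySem.List.pyRange 0 ((all_events.length : Int) - 1) 1).foldl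
    (fun acc i => if (PySem.List.pyGetD all_events i d).2.2 == 'j' && (PySem.List.pyGetD all_events (i+1) d).2.2 == 'j'
      then acc ++ [(PySem.List.pyGetD all_events (i+1) d).1 - (PySem.List.pyGetD all_events i d).2.1] else acc) []
  let jam_bridges := if (PySem.List.pyGetD all_events (-1) d).2.2 == 'j' && (PySem.List.pyGetD all_events 0 d).2.2 == 'j'
      then jam_bridges ++ [(PySem.List.pyGetD all_events 0 d).1 + 1440 - (PySem.List.pyGetD all_events (-1) d).2.1] else jam_bridges
  let min_switches : Int := (PySem.List.pyRange 0 ((all_events.length : Int) - 1) 1).foldl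
    (fun acc i => if (PySem.List.pyGetD all_events i d).2.2 != (PySem.List.pyGetD all_events (i+1) d).2.2 then acc + 1 else acc) 0
  let min_switches := if (PySem.List.pyGetD all_events (-1) d).2.2 != (PySem.List.pyGetD all_events 0 d).2.2 then min_switches + 1 else min_switches
  let cam_bridges := PySem.List.sorted cam_bridges (fun x => x) false
  let cam_bridges := if cam_bridges.length > 0 then pvAWhile cam_bridges.length cam_time cam_bridges else cam_bridges
  let jam_bridges := if jam_bridges.length > 0 then pvAWhile jam_bridges.length jam_time (PySem.List.sorted jam_bridges (fun x => x) false) else jam_bridges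
  min_switches + 2 * (cam_bridges.length : Int) + 2 * (jam_bridges.length : Int)

-- ===== PORT B =====
-- _leftover's for-loop with break: scan of the sorted bridges, counting the merged ones.
def pvBScan : List Int → Int → Int → Int
  | [], _, k => k
  | b :: rest, budget, k => if budget < b then k else pvBScan rest (budget - b) (k + 1)

def pvLeftover (bridges : List Int) (budget : Int) : Int :=
  (bridges.length : Int) - pvBScan (PySem.List.sorted bridges (fun x => x) false) budget 0

def parenting_partnering_solve_alt (cam_start : List Int) (cam_end : List Int) (jam_start : List Int) (jam_end : List Int) : Int :=
  let events := PySem.List.sorted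
    ((cam_start.zip cam_end).map (fun p => (p.1, p.2, 'c'))
      ++ (jam_start.zip jam_end).map (fun p => (p.1, p.2, 'j'))) (fun t => t.1) false
  let first := PySem.List.pyGetD events 0 (0, 0, ' ')
  let st := (events.zip (PySem.List.slice events (some 1) none ++ [(first.1 + 1440, first.2.1, first.2.2)])).foldl
    (fun (acc : List Int × List Int × Int) pq =>
      if pq.1.2.2 != pq.2.2.2 then (acc.1, acc.2.1, acc.2.2 + 1)
      else if pq.1.2.2 == 'c' then (acc.1 ++ [pq.2.1 - pq.1.2.1], acc.2.1, acc.2.2)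
      else (acc.1, acc.2.1 ++ [pq.2.1 - pq.1.2.1], acc.2.2)) ([], [], 0)
  let cam_budget : Int := 720 - ((events.filter (fun t => t.2.2 == 'c')).map (fun t => t.2.1 - t.1)).sum
  let jam_budget : Int := 720 - ((events.filter (fun t => t.2.2 == 'j')).map (fun t => t.2.1 - t.1)).sum
  st.2.2 + 2 * pvLeftover st.1 cam_budget + 2 * pvLeftover st.2.1 jam_budget

-- ===== PRECONDITION & SPEC =====
-- Pre_ excludes exactly the inputs on which A raises IndexError: a start list longer than its
-- end list (cam_end[i] / jam_end[i] out of range), and both start lists empty (all_events[-1]).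
def Pre_parenting_partnering_solve (cam_start : List Int) (cam_end : List Int) (jam_start : List Int) (jam_end : List Int) : Prop :=
  cam_start.length ≤ cam_end.length ∧ jam_start.length ≤ jam_end.length ∧ (cam_start ≠ [] ∨ jam_start ≠ [])
instance (cam_start : List Int) (cam_end : List Int) (jam_start : List Int) (jam_end : List Int) : Decidable (Pre_parenting_partnering_solve cam_start cam_end jam_start jam_end) := by unfold Pre_parenting_partnering_solve; infer_instance

def pvWitness_parenting_partnering_solve : List Int × List Int × List Int × List Int := ([60], [180], [300], [420])

def Spec_parenting_partnering_solve (cam_start : List Int) (cam_end : List Int) (jam_start : List Int) (jam_end : List Int) (out : Int) : Prop := out = parenting_partnering_solve_alt cam_start cam_end jam_start jam_end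
instance (cam_start : List Int) (cam_end : List Int) (jam_start : List Int) (jam_end : List Int) (out : Int) : Decidable (Spec_parenting_partnering_solve cam_start cam_end jam_start jam_end out) := by unfold Spec_parenting_partnering_solve; infer_instance

-- ===== CLAIM (what is proved, stated in full; the proofs are below) =====
def Claim_equal_parenting_partnering_solve : Prop := ∀ (cam_start : List Int) (cam_end : List Int) (jam_start : List Int) (jam_end : List Int), Dom_parenting_partnering_solve cam_start cam_end jam_start jam_end → Pre_parenting_partnering_solve cam_start cam_end jam_start jam_end → Spec_parenting_partnering_solve cam_start cam_end jam_start jam_end (parenting_partnering_solve cam_start cam_end jam_start jam_end)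

-- ===== LEMMAS AND PROOFS =====

lemma pv_range_fold₂ {β : Type} (xs ys : List Int) (h : xs.length ≤ ys.length)
    (f : β → Int → Int → β) (init : β) :
    (PySem.List.pyRange 0 (xs.length : Int) 1).foldl
      (fun acc i => f acc (PySem.List.pyGetD xs i 0) (PySem.List.pyGetD ys i 0)) init
    = (xs.zip ys).foldl (fun acc p => f acc p.1 p.2) init := by
  rw [PySem.List.pyRange_zero, List.foldl_map, Int.toNat_natCast]
  have h2 : (fun (acc : β) (k : Nat) => f acc (PySem.List.pyGetD xs (k : Int) 0) (PySem.List.pyGetD ys (k : Int) 0))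
      = fun acc k => f acc (xs.getD k 0) (ys.getD k 0) := by
    funext acc k
    rw [PySem.List.pyGetD_natCast, PySem.List.pyGetD_natCast]
  rw [h2]
  clear h2
  induction xs generalizing ys init with
  | nil => simp
  | cons x xs ih =>
    cases ys with
    | nil => simp at h
    | cons y ys =>
      simp only [List.length_cons]
      rw [List.range_succ_eq_map, List.foldl_cons, List.foldl_map]
      simp only [List.getD_cons_zero, List.getD_cons_succ, List.zip_cons_cons, List.foldl_cons]
      exact ih ys (by simpa using h) _


lemma pv_adj_core {α β : Type} (l : List α) (d : α) (f : β → α → α → β) (init : β) :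
    (List.range (l.length - 1)).foldl (fun acc k => f acc (l.getD k d) (l.getD (k+1) d)) init
    = (l.zip l.tail).foldl (fun acc pq => f acc pq.1 pq.2) init := by
  induction l generalizing init with
  | nil => simp
  | cons x t ih =>
    cases t with
    | nil => simp
    | cons y t' =>
      have hl : (x :: y :: t').length - 1 = ((y :: t').length - 1) + 1 := by simp
      rw [hl, List.range_succ_eq_map, List.foldl_cons, List.foldl_map]
      simp only [List.getD_cons_zero, List.getD_cons_succ, List.zip_cons_cons, List.foldl_cons,
        List.tail_cons]
      exact ih _

lemma pv_adj {β : Type} (l : List (Int × Int × Char)) (d : Int × Int × Char)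
    (f : β → (Int × Int × Char) → (Int × Int × Char) → β) (init : β) :
    (PySem.List.pyRange 0 ((l.length : Int) - 1) 1).foldl
      (fun acc i => f acc (PySem.List.pyGetD l i d) (PySem.List.pyGetD l (i+1) d)) init
    = (l.zip l.tail).foldl (fun acc pq => f acc pq.1 pq.2) init := by
  have h1 : ((l.length : Int) - 1).toNat = l.length - 1 := by omega
  rw [PySem.List.pyRange_zero, h1, List.foldl_map]
  have h2 : (fun (acc : β) (k : Nat) => f acc (PySem.List.pyGetD l (k : Int) d) (PySem.List.pyGetD l ((k : Int) + 1) d))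
      = fun acc k => f acc (l.getD k d) (l.getD (k+1) d) := by
    funext acc k
    have h3 : ((k : Int) + 1) = ((k + 1 : Nat) : Int) := by push_cast; ring
    rw [h3, PySem.List.pyGetD_natCast, PySem.List.pyGetD_natCast]
  rw [h2, pv_adj_core]

lemma pv_zip_wrap {α : Type} (x : α) (t : List α) (w : α) :
    (x :: t).zip (t ++ [w]) = (x :: t).zip t ++ [((x :: t).getLast (by simp), w)] := by
  induction t generalizing x with
  | nil => simp
  | cons y t' ih =>
    show (x, y) :: ((y :: t').zip (t' ++ [w])) = ((x, y) :: (y :: t').zip t') ++ _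
    rw [ih y]
    simp [List.getLast_cons]

lemma pv_foldl_sub {α : Type} (l : List α) (g : α → Int) (init : Int) :
    l.foldl (fun t p => t - g p) init = init - (l.map g).sum := by
  induction l generalizing init with
  | nil => simp
  | cons a l ih => simp [ih]; ring

lemma pv_fuse (Z : List ((Int × Int × Char) × (Int × Int × Char))) (cb jb : List Int) (sw : Int) :
    Z.foldl (fun (acc : List Int × List Int × Int) pq =>
        if pq.1.2.2 != pq.2.2.2 then (acc.1, acc.2.1, acc.2.2 + 1)
        else if pq.1.2.2 == 'c' then (acc.1 ++ [pq.2.1 - pq.1.2.1], acc.2.1, acc.2.2)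
        else (acc.1, acc.2.1 ++ [pq.2.1 - pq.1.2.1], acc.2.2)) (cb, jb, sw)
    = (cb ++ (Z.filter (fun pq => !(pq.1.2.2 != pq.2.2.2) && pq.1.2.2 == 'c')).map (fun pq => pq.2.1 - pq.1.2.1),
       jb ++ (Z.filter (fun pq => !(pq.1.2.2 != pq.2.2.2) && !(pq.1.2.2 == 'c'))).map (fun pq => pq.2.1 - pq.1.2.1),
       sw + (Z.countP (fun pq => pq.1.2.2 != pq.2.2.2) : Nat)) := by
  induction Z generalizing cb jb sw with
  | nil => simp
  | cons pq Z ih =>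
    simp only [List.foldl_cons, List.filter_cons, List.countP_cons]
    by_cases h1 : (pq.1.2.2 != pq.2.2.2) = true
    · simp only [h1, if_true, Bool.not_true, Bool.false_and, ih]
      simp
      omega
    · rw [Bool.not_eq_true] at h1
      by_cases h2 : (pq.1.2.2 == 'c') = true
      · simp only [h1, h2, Bool.false_eq_true, if_false, if_true, Bool.not_false, Bool.true_and, ih]
        simp
      · rw [Bool.not_eq_true] at h2
        simp only [h1, h2, Bool.false_eq_true, if_false, Bool.not_false, Bool.true_and, ih]
        simp

lemma pv_zip_wrap' {α : Type} (x : α) (t : List α) (w : α) (d : α) :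
    (x :: t).zip (t ++ [w]) = (x :: t).zip t ++ [(PySem.List.pyGetD (x :: t) (-1) d, w)] := by
  rw [PySem.List.pyGetD_neg_one (x :: t) d (by simp)]
  exact pv_zip_wrap x t w

lemma pv_min_head (b : Int) (rest : List Int) (h : ∀ y ∈ rest, b ≤ y) :
    PySem.List.min? (b :: rest) (fun x => x) = some b := by
  rw [PySem.List.min?_id_cons]
  congr 1
  rcases PySem.List.foldl_min_mem rest b with h1 | h1
  · exact h1
  · exact le_antisymm (PySem.List.foldl_min_le rest b).1 (h _ h1)

lemma pv_bScan_acc (s : List Int) : ∀ t k, pvBScan s t k = k + pvBScan s t 0 := by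
  induction s with
  | nil => intro t k; simp [pvBScan]
  | cons b rest ih =>
    intro t k
    by_cases h : t < b
    · simp [pvBScan, h]
    · rw [pvBScan, pvBScan, if_neg h, if_neg h, ih (t-b) (k+1), ih (t-b) (0+1)]
      ring

lemma pv_while_len (s : List Int) (hs : List.Pairwise (· ≤ ·) s) :
    ∀ fuel, s.length ≤ fuel → ∀ time,
      ((pvAWhile fuel time s).length : Int) = (s.length : Int) - pvBScan s time 0 := by
  induction s with
  | nil => intro fuel hf time; cases fuel <;> simp [pvAWhile, pvBScan]
  | cons b rest ih =>
    intro fuel hf time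
    have hf1 : 1 ≤ fuel := le_trans (by simp) hf
    obtain ⟨f, rfl⟩ : ∃ f, fuel = f + 1 := ⟨fuel - 1, by omega⟩
    obtain ⟨hble, hpw⟩ := List.pairwise_cons.mp hs
    rw [pvAWhile]
    by_cases hc : b ≤ time
    · rw [if_pos hc]
      have hmin : (PySem.List.min? (b :: rest) (fun x => x)).getD 0 = b := by
        rw [pv_min_head b rest hble]; rfl
      simp only [hmin, PySem.List.remove?_cons_self, Option.getD_some,
        PySem.List.sorted_eq_self_of_pairwise rest (fun x => x) hpw]
      have hbs : pvBScan (b :: rest) time 0 = 1 + pvBScan rest (time - b) 0 := by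
        rw [pvBScan, if_neg (by omega), pv_bScan_acc rest (time - b) (0+1)]
        ring
      rw [hbs]
      cases rest with
      | nil => simp [pvBScan]
      | cons c rest' =>
        rw [if_neg (by simp)]
        rw [ih hpw f (by simpa using hf) (time - b)]
        simp only [List.length_cons]
        push_cast
        ring
    · rw [if_neg hc]
      rw [pvBScan, if_pos (by omega)]
      simp

lemma pv_greedy (l : List Int) (time : Int) :
    (((if (PySem.List.sorted l (fun x => x) false).length > 0
        then pvAWhile (PySem.List.sorted l (fun x => x) false).length time (PySem.List.sorted l (fun x => x) false)
        else PySem.List.sorted l (fun x => x) false).length : Int))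
    = pvLeftover l time := by
  by_cases h : (PySem.List.sorted l (fun x => x) false).length > 0
  · rw [if_pos h, pvLeftover,
      pv_while_len _ (PySem.List.sorted_pairwise l (fun x => x)) _ le_rfl time,
      PySem.List.length_sorted]
  · rw [if_neg h, pvLeftover]
    have h0 : PySem.List.sorted l (fun x => x) false = [] := by
      cases hh : PySem.List.sorted l (fun x => x) false with
      | nil => rfl
      | cons a t => rw [hh] at h; simp at h
    rw [h0]
    have hl : l = [] := (PySem.List.sorted_eq_nil_iff l (fun x => x) false).mp h0
    simp [hl, pvBScan]

lemma pv_greedy' (l : List Int) (time : Int) :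
    (((if l.length > 0
        then pvAWhile l.length time (PySem.List.sorted l (fun x => x) false)
        else l).length : Int))
    = pvLeftover l time := by
  by_cases h : l.length > 0
  · rw [if_pos h, pvLeftover,
      pv_while_len _ (PySem.List.sorted_pairwise l (fun x => x)) _ (by rw [PySem.List.length_sorted]) time,
      PySem.List.length_sorted]
  · have hl : l = [] := by cases l with | nil => rfl | cons a t => simp at h
    rw [hl]
    have h0 : PySem.List.sorted ([] : List Int) (fun x => x) false = [] :=
      (PySem.List.sorted_eq_nil_iff ([] : List Int) (fun x => x) false).mpr rfl
    simp [h0, pvLeftover, pvBScan]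

lemma pv_cond_c (a b : Char) : (!(a != b) && (a == 'c')) = ((a == 'c') && (b == 'c')) := by
  by_cases hab : a = b
  · subst hab; by_cases ha : a = 'c' <;> simp [ha]
  · by_cases ha : a = 'c'
    · subst ha
      have hb : ¬(b = 'c') := fun h => hab h.symm
      simp [bne, hab, hb]
    · have h1 : (a == 'c') = false := beq_eq_false_iff_ne.mpr ha
      simp [h1]

lemma pv_cond_j (a b : Char) (ha : a = 'c' ∨ a = 'j') (hb : b = 'c' ∨ b = 'j') :
    (!(a != b) && !(a == 'c')) = ((a == 'j') && (b == 'j')) := by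
  rcases ha with ha | ha <;> rcases hb with hb | hb <;> subst ha <;> subst hb <;> decide

theorem pv_main (cs ce js je : List Int) (hc : cs.length ≤ ce.length) (hj : js.length ≤ je.length)
    (hne : cs ≠ [] ∨ js ≠ []) :
    parenting_partnering_solve cs ce js je = parenting_partnering_solve_alt cs ce js je := by
  simp only [parenting_partnering_solve, parenting_partnering_solve_alt]
  -- A's two event-building loops build exactly B's two zip-maps
  have hb1 : List.foldl (fun acc i => acc ++ [(PySem.List.pyGetD cs i 0, PySem.List.pyGetD ce i 0, 'c')])
      ([] : List (Int × Int × Char)) (PySem.List.pyRange 0 (cs.length : Int) 1)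
      = List.map (fun p => (p.1, p.2, 'c')) (cs.zip ce) :=
    ((pv_range_fold₂ cs ce hc (fun acc s e => acc ++ [(s, e, 'c')]) []).trans
      (PySem.List.foldl_append_singleton_eq_map (fun p : Int × Int => (p.1, p.2, 'c')) (cs.zip ce) [])).trans
      (List.nil_append _)
  rw [hb1]
  have hb2 : List.foldl (fun acc i => acc ++ [(PySem.List.pyGetD js i 0, PySem.List.pyGetD je i 0, 'j')])
      (List.map (fun p => (p.1, p.2, 'c')) (cs.zip ce)) (PySem.List.pyRange 0 (js.length : Int) 1)
      = List.map (fun p => (p.1, p.2, 'c')) (cs.zip ce) ++ List.map (fun p => (p.1, p.2, 'j')) (js.zip je) :=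
    (pv_range_fold₂ js je hj (fun acc s e => acc ++ [(s, e, 'j')]) _).trans
      (PySem.List.foldl_append_singleton_eq_map (fun p : Int × Int => (p.1, p.2, 'j')) (js.zip je) _)
  rw [hb2]
  set LCJ : List (Int × Int × Char) :=
    List.map (fun p => (p.1, p.2, 'c')) (cs.zip ce) ++ List.map (fun p => (p.1, p.2, 'j')) (js.zip je)
    with hLCJ
  have hlen : 0 < LCJ.length := by
    rw [hLCJ]
    rcases hne with h | h
    · have h1 := List.length_pos_of_ne_nil h
      simp [List.length_zip]
      omega
    · have h1 := List.length_pos_of_ne_nil h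
      simp [List.length_zip]
      omega
  have hEne : PySem.List.sorted LCJ (fun t => t.1) false ≠ [] := by
    rw [Ne, PySem.List.sorted_eq_nil_iff]
    intro h0
    rw [h0] at hlen
    simp at hlen
  have htag0 : ∀ ev ∈ PySem.List.sorted LCJ (fun t => t.1) false, ev.2.2 = 'c' ∨ ev.2.2 = 'j' := by
    intro ev hm
    rw [PySem.List.mem_sorted, hLCJ] at hm
    rcases List.mem_append.mp hm with h | h <;> rcases List.mem_map.mp h with ⟨p, _, rfl⟩
    · left; rfl
    · right; rfl
  have hperm0 : (PySem.List.sorted LCJ (fun t => t.1) false).Perm LCJ :=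
    PySem.List.sorted_perm _ _ _
  obtain ⟨e0, tl, hEc⟩ := List.exists_cons_of_ne_nil hEne
  rw [hEc] at htag0 hperm0 ⊢
  -- first / last events
  simp only [PySem.List.pyGetD_zero, List.getD_cons_zero, PySem.List.slice_from_one, List.tail_cons]
  have hLmem : PySem.List.pyGetD (e0 :: tl) (-1) ((0 : Int), (0 : Int), ' ') ∈ (e0 :: tl) := by
    rw [PySem.List.pyGetD_neg_one _ _ (by simp)]
    exact List.getLast_mem _
  -- B's circular pair list splits into the adjacent pairs plus the wrap pair
  rw [pv_zip_wrap' e0 tl ((e0.1 + 1440, e0.2.1, e0.2.2) : Int × Int × Char) ((0 : Int), (0 : Int), ' ')]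
  rw [pv_fuse]
  -- A's three adjacent-index loops become filters/counts over the same pair list
  rw [pv_adj (e0 :: tl) ((0 : Int), (0 : Int), ' ')
      (fun acc p q => if p.2.2 == 'c' && q.2.2 == 'c' then acc ++ [q.1 - p.2.1] else acc) []]
  rw [pv_adj (e0 :: tl) ((0 : Int), (0 : Int), ' ')
      (fun acc p q => if p.2.2 == 'j' && q.2.2 == 'j' then acc ++ [q.1 - p.2.1] else acc) []]
  rw [pv_adj (e0 :: tl) ((0 : Int), (0 : Int), ' ')
      (fun acc p q => if p.2.2 != q.2.2 then acc + 1 else acc) (0 : Int)]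
  simp only [List.tail_cons]
  rw [PySem.List.foldl_append_if (fun pq : (Int × Int × Char) × (Int × Int × Char) => pq.1.2.2 == 'c' && pq.2.2.2 == 'c')
      (fun pq => pq.2.1 - pq.1.2.1) ((e0 :: tl).zip tl) []]
  rw [PySem.List.foldl_append_if (fun pq : (Int × Int × Char) × (Int × Int × Char) => pq.1.2.2 == 'j' && pq.2.2.2 == 'j')
      (fun pq => pq.2.1 - pq.1.2.1) ((e0 :: tl).zip tl) []]
  rw [PySem.List.foldl_count_if (fun pq : (Int × Int × Char) × (Int × Int × Char) => pq.1.2.2 != pq.2.2.2)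
      ((e0 :: tl).zip tl) 0]
  -- budgets: A's index loops subtract the same total duration B sums over the sorted events
  rw [pv_range_fold₂ cs ce hc (fun t s e => t - (e - s)) 720,
    pv_foldl_sub (cs.zip ce) (fun p => p.2 - p.1) 720,
    pv_range_fold₂ js je hj (fun t s e => t - (e - s)) 720,
    pv_foldl_sub (js.zip je) (fun p => p.2 - p.1) 720]
  have hsum_c : (List.map (fun t : Int × Int × Char => t.2.1 - t.1)
        (List.filter (fun t => t.2.2 == 'c') (e0 :: tl))).sum
      = (List.map (fun p : Int × Int => p.2 - p.1) (cs.zip ce)).sum := by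
    rw [((hperm0.filter (fun t => t.2.2 == 'c')).map (fun t : Int × Int × Char => t.2.1 - t.1)).sum_eq,
      hLCJ]
    simp [List.filter_append, List.filter_map, Function.comp_def]
  have hsum_j : (List.map (fun t : Int × Int × Char => t.2.1 - t.1)
        (List.filter (fun t => t.2.2 == 'j') (e0 :: tl))).sum
      = (List.map (fun p : Int × Int => p.2 - p.1) (js.zip je)).sum := by
    rw [((hperm0.filter (fun t => t.2.2 == 'j')).map (fun t : Int × Int × Char => t.2.1 - t.1)).sum_eq,
      hLCJ]
    simp [List.filter_append, List.filter_map, Function.comp_def]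
  rw [hsum_c, hsum_j]
  -- A's merge loops = length bookkeeping of B's single scans
  rw [pv_greedy, pv_greedy']
  -- split B's circular pair list into adjacent pairs + wrap pair, align the filters
  simp only [List.nil_append, List.filter_append, List.map_append, List.countP_append]
  rw [List.filter_congr
    (p := fun pq : (Int × Int × Char) × (Int × Int × Char) => !(pq.1.2.2 != pq.2.2.2) && pq.1.2.2 == 'c')
    (q := fun pq => pq.1.2.2 == 'c' && pq.2.2.2 == 'c')
    (l := (e0 :: tl).zip tl)
    (fun pq _ => pv_cond_c pq.1.2.2 pq.2.2.2)]
  rw [List.filter_congr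
    (p := fun pq : (Int × Int × Char) × (Int × Int × Char) => !(pq.1.2.2 != pq.2.2.2) && !(pq.1.2.2 == 'c'))
    (q := fun pq => pq.1.2.2 == 'j' && pq.2.2.2 == 'j')
    (l := (e0 :: tl).zip tl)
    (fun pq hm => by
      have h1 := List.of_mem_zip hm
      exact pv_cond_j pq.1.2.2 pq.2.2.2 (htag0 _ h1.1) (htag0 _ (List.mem_cons_of_mem e0 h1.2)))]
  simp only [List.filter_cons, List.filter_nil, List.countP_cons, List.countP_nil]
  have hpc := pv_cond_c (PySem.List.pyGetD (e0 :: tl) (-1) ((0 : Int), (0 : Int), ' ')).2.2 e0.2.2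
  have hpj := pv_cond_j (PySem.List.pyGetD (e0 :: tl) (-1) ((0 : Int), (0 : Int), ' ')).2.2 e0.2.2
    (htag0 _ hLmem) (htag0 e0 (List.mem_cons_self))
  rw [hpc, hpj]
  by_cases hwc : ((PySem.List.pyGetD (e0 :: tl) (-1) ((0 : Int), (0 : Int), ' ')).2.2 == 'c' && e0.2.2 == 'c') = true <;>
    by_cases hwj : ((PySem.List.pyGetD (e0 :: tl) (-1) ((0 : Int), (0 : Int), ' ')).2.2 == 'j' && e0.2.2 == 'j') = true <;>
      by_cases hws : ((PySem.List.pyGetD (e0 :: tl) (-1) ((0 : Int), (0 : Int), ' ')).2.2 != e0.2.2) = true <;>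
        simp [hwc, hwj, hws]

-- ===== VERDICT (by name: the statement is the Claim_ definition above) =====
theorem parenting_partnering_solve_spec : Claim_equal_parenting_partnering_solve := by
  intro cs ce js je _hdom hpre
  exact pv_main cs ce js je hpre.1 hpre.2.1 hpre.2.2
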